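-- pv_equiv track=rewrite | github.com/YevhenMoroz/th2-script-quod-demo | test_cases/eq/Bag/QAP_T7648.py | __adjustment_of_value
-- ===== SOURCE A (Python) =====
-- def __adjustment_of_value(string_value: str):
--     new_value = str()
--     for i in range(len(string_value)):
--         if i is 1:
--             new_value = new_value + ',' + string_value[i]
--         else:
--             new_value = new_value + string_value[i]
--     return new_value
-- ===== SOURCE B (Python) =====
-- def __adjustment_of_value(string_value: str):
--     # closed-form: first char, a comma when there is more than one char, then the rest
--     return string_value[:1] + (',' if len(string_value) > 1 else '') + string_value[1:]
-- ===== Notes on version B (the rewrite author's own statement) =====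
-- stated objective: simpler
-- what changed: Replaces the per-character index loop with a single closed-form slice expression: first character + conditional comma + remaining suffix.
import Mathlib
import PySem

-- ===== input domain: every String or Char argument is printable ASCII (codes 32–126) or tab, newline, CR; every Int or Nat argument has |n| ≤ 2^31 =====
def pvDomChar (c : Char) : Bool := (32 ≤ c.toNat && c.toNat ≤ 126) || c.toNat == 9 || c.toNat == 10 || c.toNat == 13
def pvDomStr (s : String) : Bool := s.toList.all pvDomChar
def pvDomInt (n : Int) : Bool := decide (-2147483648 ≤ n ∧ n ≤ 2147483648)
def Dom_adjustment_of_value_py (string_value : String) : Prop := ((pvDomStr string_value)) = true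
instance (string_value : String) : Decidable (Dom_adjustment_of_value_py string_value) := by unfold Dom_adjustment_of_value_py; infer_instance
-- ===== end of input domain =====

-- B replaces A's per-index accumulation loop by a single closed-form slice expression (simpler).

-- ===== PORT A =====
-- for i in range(len(s)): new_value += (',' + s[i]) if i == 1 else s[i]
def adjustment_of_value_py (string_value : String) : String :=
  let cs := string_value.toList
  String.ofList ((PySem.List.pyRange 0 cs.length 1).foldl
    (fun acc i =>
      if i = 1 then acc ++ [','] ++ [PySem.List.pyGetD cs i ' ']
      else acc ++ [PySem.List.pyGetD cs i ' ']) [])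

-- ===== PORT B =====
-- s[:1] + (',' if len(s) > 1 else '') + s[1:]
def adjustment_of_value_py_alt (string_value : String) : String :=
  let cs := string_value.toList
  String.ofList (PySem.List.slice cs none (some 1)
    ++ (if 1 < cs.length then [','] else [])
    ++ PySem.List.slice cs (some 1) none)

-- ===== PRECONDITION & SPEC =====
def Spec_adjustment_of_value_py (string_value : String) (out : String) : Prop := out = adjustment_of_value_py_alt string_value
instance (string_value : String) (out : String) : Decidable (Spec_adjustment_of_value_py string_value out) := by unfold Spec_adjustment_of_value_py; infer_instance

-- ===== CLAIM (what is proved, stated in full; the proofs are below) =====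
def Claim_equal_adjustment_of_value_py : Prop := ∀ (string_value : String), Dom_adjustment_of_value_py string_value → Spec_adjustment_of_value_py string_value (adjustment_of_value_py string_value)

-- ===== LEMMAS AND PROOFS =====

-- A's loop after n steps (n ≤ len cs) has built the answer for the prefix take n cs.
theorem adj_fold_invariant (cs : List Char) (n : Nat) (h : n ≤ cs.length) :
    (PySem.List.pyRange 0 (n : Int) 1).foldl
      (fun acc i =>
        if i = 1 then acc ++ [','] ++ [PySem.List.pyGetD cs i ' ']
        else acc ++ [PySem.List.pyGetD cs i ' ']) []
    = (cs.take n).take 1 ++ (if 1 < n then [','] else []) ++ (cs.take n).drop 1 := by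
  induction n with
  | zero => simp
  | succ m ih =>
    have hm : m ≤ cs.length := Nat.le_of_succ_le h
    have hmlt : m < cs.length := h
    have hstep : ((m : Int) + 1) = ((m + 1 : Nat) : Int) := by push_cast; ring
    rw [← hstep, PySem.List.pyRange_one_succ_right (by positivity),
      List.foldl_append, ih hm]
    have hget : PySem.List.pyGetD cs (m : Int) ' ' = cs[m] := by
      rw [PySem.List.pyGetD_natCast]
      exact List.getD_eq_getElem cs ' ' hmlt
    have htake : cs.take (m + 1) = cs.take m ++ [cs[m]] := by
      rw [List.take_add_one]; simp [List.getElem?_eq_getElem hmlt]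
    simp only [List.foldl_cons, List.foldl_nil, hget, htake]
    rcases Nat.lt_or_ge m 2 with h2 | h2
    · interval_cases m <;>
        · rcases cs with _ | ⟨a, _ | ⟨b, t⟩⟩ <;> simp_all
    · have hne : ¬ ((m : Int) = 1) := by omega
      have h1m : (1:Nat) < m := by omega
      have h1m' : (1:Nat) < m + 1 := by omega
      have hm1 : 1 ≤ (cs.take m).length := by
        rw [List.length_take]; omega
      simp only [hne, if_false]
      rw [List.take_append_of_le_length hm1, List.drop_append_of_le_length hm1]
      simp [h1m, h1m']

-- ===== VERDICT (by name: the statement is the Claim_ definition above) =====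
theorem adjustment_of_value_py_spec : Claim_equal_adjustment_of_value_py := by
  intro s _
  unfold Spec_adjustment_of_value_py adjustment_of_value_py adjustment_of_value_py_alt
  simp only []
  rw [adj_fold_invariant s.toList s.toList.length le_rfl]
  generalize s.toList = cs
  rcases cs with _ | ⟨a, _ | ⟨b, t⟩⟩ <;>
    simp [PySem.List.slice, PySem.List.clampIdx]
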